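-- pv_equiv track=rewrite | github.com/Srinivas-18/VPN-Detection-De-anonymization-Tool | deanon/encrypted_traffic_analyzer.py | _cluster_packet_sizes
-- ===== SOURCE A (Python) =====
-- from typing import Dict, List, Tuple, Optional
--
-- def _cluster_packet_sizes(sizes: List[int]) -> Dict:
--     """Cluster packet sizes to identify patterns"""
--     if not sizes:
--         return {}
--
--     small = len([s for s in sizes if s <= 100])
--     medium = len([s for s in sizes if 100 < s <= 1000])
--     large = len([s for s in sizes if s > 1000])
--
--     return {
--         'small_packets': small,
--         'medium_packets': medium,
--         'large_packets': large,
--         'size_diversity': len(set(sizes))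
--     }
-- ===== SOURCE B (Python) =====
-- def _cluster_packet_sizes(sizes):
--     """Cluster packet sizes via a frequency histogram over distinct values."""
--     if not sizes:
--         return {}
--     freq = {}
--     for s in sizes:
--         freq[s] = freq.get(s, 0) + 1
--     small = medium = large = 0
--     for value, count in freq.items():
--         if value <= 100:
--             small += count
--         elif value <= 1000:
--             medium += count
--         else:
--             large += count
--     return {
--         'small_packets': small,
--         'medium_packets': medium,
--         'large_packets': large,
--         'size_diversity': len(freq),
--     }
-- ===== Notes on version B (the rewrite author's own statement) =====
-- stated objective: alternative
-- what changed: Instead of three filter scans over the raw list plus a set() build, B builds a value->frequency histogram in one pass and then buckets the DISTINCT values, adding multiplicities; size_diversity is the histogram's size, no set is built.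
import Mathlib
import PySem

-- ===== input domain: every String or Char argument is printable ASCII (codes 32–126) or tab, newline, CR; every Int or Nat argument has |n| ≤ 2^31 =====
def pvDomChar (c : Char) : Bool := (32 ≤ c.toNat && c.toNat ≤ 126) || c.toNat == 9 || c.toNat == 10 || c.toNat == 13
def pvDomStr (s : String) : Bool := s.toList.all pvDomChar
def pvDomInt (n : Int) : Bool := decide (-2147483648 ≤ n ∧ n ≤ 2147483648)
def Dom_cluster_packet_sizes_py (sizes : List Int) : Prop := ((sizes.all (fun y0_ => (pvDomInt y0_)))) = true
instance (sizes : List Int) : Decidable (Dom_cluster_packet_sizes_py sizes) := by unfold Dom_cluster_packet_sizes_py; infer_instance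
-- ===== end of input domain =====

-- B replaces A's three filter comprehensions + set() build by a value->frequency
-- histogram built in one pass, then bucketed over the distinct values (objective: alternative).

-- ===== PORT A =====
def cluster_packet_sizes_py (sizes : List Int) : List (String × Int) :=
  if sizes = [] then []
  else
    let small : Int := (sizes.filter (fun s => decide (s ≤ 100))).length
    let medium : Int := (sizes.filter (fun s => decide (100 < s ∧ s ≤ 1000))).length
    let large : Int := (sizes.filter (fun s => decide (s > 1000))).length
    [("small_packets", small), ("medium_packets", medium), ("large_packets", large),
     ("size_diversity", PySem.Set.len (PySem.Set.ofList sizes))]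

-- ===== PORT B =====
-- the if/elif/else body of B's second loop over freq.items()
def cluster_packet_sizes_py_alt_bucket (t : Int × Int × Int) (p : Int × Int) : Int × Int × Int :=
  if p.1 ≤ 100 then (t.1 + p.2, t.2.1, t.2.2)
  else if p.1 ≤ 1000 then (t.1, t.2.1 + p.2, t.2.2)
  else (t.1, t.2.1, t.2.2 + p.2)

def cluster_packet_sizes_py_alt (sizes : List Int) : List (String × Int) :=
  if sizes = [] then []
  else
    let freq := sizes.foldl (fun d s => d.insert s (d.getD s 0 + 1)) PySem.Dict.empty
    let acc := freq.items.foldl cluster_packet_sizes_py_alt_bucket (0, 0, 0)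
    [("small_packets", acc.1), ("medium_packets", acc.2.1), ("large_packets", acc.2.2),
     ("size_diversity", (freq.size : Int))]

-- ===== PRECONDITION & SPEC =====
def Spec_cluster_packet_sizes_py (sizes : List Int) (out : List (String × Int)) : Prop := out = cluster_packet_sizes_py_alt sizes
instance (sizes : List Int) (out : List (String × Int)) : Decidable (Spec_cluster_packet_sizes_py sizes out) := by unfold Spec_cluster_packet_sizes_py; infer_instance

-- ===== CLAIM (what is proved, stated in full; the proofs are below) =====
def Claim_equal_cluster_packet_sizes_py : Prop := ∀ (sizes : List Int), Dom_cluster_packet_sizes_py sizes → Spec_cluster_packet_sizes_py sizes (cluster_packet_sizes_py sizes)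

-- ===== LEMMAS AND PROOFS =====

-- B's bucket fold over an items list is three filtered multiplicity sums
theorem bucket_fold (its : List (Int × Int)) (a b c : Int) :
    its.foldl cluster_packet_sizes_py_alt_bucket (a, b, c) =
      (a + ((its.filter (fun p => decide (p.1 ≤ 100))).map (·.2)).sum,
       b + ((its.filter (fun p => decide (¬ p.1 ≤ 100 ∧ p.1 ≤ 1000))).map (·.2)).sum,
       c + ((its.filter (fun p => decide (¬ p.1 ≤ 100 ∧ ¬ p.1 ≤ 1000))).map (·.2)).sum) := by
  induction its generalizing a b c with
  | nil => simp
  | cons p ps ih =>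
    simp only [List.foldl_cons, List.filter_cons]
    by_cases h1 : p.1 ≤ 100
    · simp [cluster_packet_sizes_py_alt_bucket, h1, ih]; ring
    · by_cases h2 : p.1 ≤ 1000
      · simp [cluster_packet_sizes_py_alt_bucket, h1, h2, ih]; ring
      · simp [cluster_packet_sizes_py_alt_bucket, h1, h2, ih]; ring

-- summing multiplicities of l over a Nodup superset of l's values is counting in l
theorem sum_counts (P : Int → Bool) (l s : List Int) (hnd : s.Nodup)
    (hsub : ∀ x ∈ l, x ∈ s) :
    ((s.filter P).map (fun k => (l.count k : Int))).sum = ((l.filter (fun x => P x)).length : Int) := by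
  induction l with
  | nil => simp
  | cons x xs ih =>
    have hx : x ∈ s := hsub x (List.mem_cons_self)
    have hxs : ∀ y ∈ xs, y ∈ s := fun y hy => hsub y (List.mem_cons_of_mem _ hy)
    have hcount : ∀ k, ((x :: xs).count k : Int) = (xs.count k : Int) + (if k = x then 1 else 0) := by
      intro k
      by_cases hk : k = x
      · subst hk; simp
      · simp [hk, Ne.symm]
    have hsplit :
        ((s.filter P).map (fun k => ((x :: xs).count k : Int))).sum =
          ((s.filter P).map (fun k => (xs.count k : Int))).sum +
          ((s.filter P).map (fun k => if k = x then (1 : Int) else 0)).sum := by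
      rw [← List.sum_map_add]
      exact congrArg List.sum (List.map_congr_left fun k _ => hcount k)
    have hind :
        ((s.filter P).map (fun k => if k = x then (1 : Int) else 0)).sum =
          if P x then 1 else 0 := by
      by_cases hPx : P x
      · have hmem : x ∈ s.filter P := List.mem_filter.mpr ⟨hx, hPx⟩
        obtain ⟨u, v, huv⟩ := List.append_of_mem hmem
        have hndf : (s.filter P).Nodup := hnd.filter _
        rw [huv] at hndf ⊢
        have hxu : x ∉ u := fun h => (List.disjoint_of_nodup_append hndf h) List.mem_cons_self
        have hxv : x ∉ v := (List.nodup_cons.mp (hndf.sublist (List.sublist_append_right u _))).1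
        simp only [List.map_append, List.map_cons, List.sum_append, List.sum_cons]
        have hu : (u.map (fun k => if k = x then (1 : Int) else 0)).sum = 0 := by
          rw [List.sum_eq_zero]; intro y hy
          obtain ⟨k, hk, hky⟩ := List.mem_map.mp hy
          rw [← hky, if_neg (fun (h : k = x) => hxu (h ▸ hk))]
        have hv : (v.map (fun k => if k = x then (1 : Int) else 0)).sum = 0 := by
          rw [List.sum_eq_zero]; intro y hy
          obtain ⟨k, hk, hky⟩ := List.mem_map.mp hy
          rw [← hky, if_neg (fun (h : k = x) => hxv (h ▸ hk))]
        rw [hu, hv]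
        simp [hPx]
      · rw [if_neg hPx, List.sum_eq_zero]
        intro y hy
        obtain ⟨k, hk, hky⟩ := List.mem_map.mp hy
        have : k ≠ x := fun h => hPx (h ▸ (List.mem_filter.mp hk).2)
        rw [← hky, if_neg this]
    rw [hsplit, ih hxs, hind, List.filter_cons]
    by_cases hPx : P x
    · simp [hPx]
    · simp [hPx]

-- ===== VERDICT (by name: the statement is the Claim_ definition above) =====
theorem cluster_packet_sizes_py_spec : Claim_equal_cluster_packet_sizes_py := by
  intro sizes _
  unfold Spec_cluster_packet_sizes_py cluster_packet_sizes_py cluster_packet_sizes_py_alt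
  by_cases h : sizes = []
  · simp [h]
  · simp only [h, if_false]
    rw [PySem.Dict.foldl_insert_getD_add_one_eq_counter, PySem.Dict.items_counter, bucket_fold]
    have hfm : ∀ (P : Int × Int → Bool),
        (((PySem.Set.ofList sizes).map (fun k => (k, (sizes.count k : Int)))).filter P).map (·.2) =
          ((PySem.Set.ofList sizes).filter (fun k => P (k, (sizes.count k : Int)))).map
            (fun k => (sizes.count k : Int)) := by
      intro P; rw [List.filter_map, List.map_map]; rfl
    have hnd := PySem.Set.nodup_ofList sizes
    have hsub : ∀ x ∈ sizes, x ∈ PySem.Set.ofList sizes :=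
      fun x hx => (PySem.Set.mem_ofList sizes x).mpr hx
    simp only [hfm]
    rw [sum_counts (fun k => decide (k ≤ 100)) sizes _ hnd hsub,
        sum_counts (fun k => decide (¬ k ≤ 100 ∧ k ≤ 1000)) sizes _ hnd hsub,
        sum_counts (fun k => decide (¬ k ≤ 100 ∧ ¬ k ≤ 1000)) sizes _ hnd hsub]
    have e2 : sizes.filter (fun x => decide (¬ x ≤ 100 ∧ x ≤ 1000)) =
        sizes.filter (fun s => decide (100 < s ∧ s ≤ 1000)) := by
      apply List.filter_congr; intro x _; simp
    have e3 : sizes.filter (fun x => decide (¬ x ≤ 100 ∧ ¬ x ≤ 1000)) =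
        sizes.filter (fun s => decide (s > 1000)) := by
      apply List.filter_congr; intro x _; simp
      omega
    rw [e2, e3]
    simp [PySem.Dict.size, PySem.Dict.items_counter, PySem.Set.len]
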